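-- pv_equiv track=rewrite | github.com/liu-bluesky/AI-Native | web-admin/api/routers/agent_templates.py | _template_keys_overlap
-- ===== SOURCE A (Python) =====
-- def _template_keys_overlap(left: set[str], right: set[str]) -> bool:
--     if not left or not right:
--         return False
--     for item in left:
--         for other in right:
--             if item == other:
--                 return True
--             if min(len(item), len(other)) >= 6 and (item in other or other in item):
--                 return True
--     return False
-- ===== SOURCE B (Python) =====
-- def _long_substrings(strings):
--     # every substring of length >= 6 of any string in the collection
--     return {s[i:j] for s in strings for i in range(len(s)) for j in range(i + 6, len(s) + 1)}
--
--
-- def _template_keys_overlap(left: set[str], right: set[str]) -> bool: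
--     if left & right:
--         return True
--     return bool(left & _long_substrings(right)) or bool(right & _long_substrings(left))
-- ===== Notes on version B (the rewrite author's own statement) =====
-- stated objective: alternative
-- what changed: B never compares pairs: it tests one set intersection for exact matches and then intersects each side with a precomputed set of ALL length>=6 substrings of the other side, so the pairwise containment loop of A disappears entirely.
import Mathlib
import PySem

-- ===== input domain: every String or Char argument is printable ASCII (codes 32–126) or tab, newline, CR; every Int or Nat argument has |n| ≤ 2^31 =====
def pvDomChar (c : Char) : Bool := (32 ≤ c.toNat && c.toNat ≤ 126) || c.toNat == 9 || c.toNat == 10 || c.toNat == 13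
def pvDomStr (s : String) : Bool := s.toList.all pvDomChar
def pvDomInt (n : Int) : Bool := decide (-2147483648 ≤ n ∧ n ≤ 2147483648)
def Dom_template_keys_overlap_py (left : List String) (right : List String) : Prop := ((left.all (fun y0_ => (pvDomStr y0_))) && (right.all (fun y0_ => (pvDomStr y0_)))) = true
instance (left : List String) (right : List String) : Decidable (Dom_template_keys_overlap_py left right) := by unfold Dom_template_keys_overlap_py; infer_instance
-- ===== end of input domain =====

-- B replaces A's pairwise equality/containment double loop by set algebra: one intersection for
-- exact matches, then intersections of each side with a precomputed set of all length-≥6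
-- substrings of the other side (objective: alternative; return value only, no mutation involved).


-- ===== PORT A =====
-- literal port of A: guard on empty inputs, then nested loop with equality and min-length/substring test per pair
def template_keys_overlap_py (left : List String) (right : List String) : Bool :=
  if left = [] || right = [] then false
  else
    left.any (fun item =>
      right.any (fun other =>
        item == other ||
          (decide (6 ≤ min (PySem.Str.len item) (PySem.Str.len other)) &&
            (PySem.Str.isIn item other || PySem.Str.isIn other item))))

-- ===== PORT B =====
-- port of B's helper _long_substrings: the set comprehension {s[i:j] for s in strings
-- for i in range(len(s)) for j in range(i+6, len(s)+1)}
def pvLongSubs (strings : List String) : PySem.Set String :=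
  PySem.Set.ofList (strings.flatMap (fun s =>
    (PySem.List.pyRange 0 (PySem.Str.len s) 1).flatMap (fun i =>
      (PySem.List.pyRange (i + 6) (PySem.Str.len s + 1) 1).map (fun j =>
        PySem.Str.slice s (some i) (some j)))))

-- port of B: intersection of the two sets, then each side intersected with the
-- length-≥6 substring set of the other side
def template_keys_overlap_py_alt (left : List String) (right : List String) : Bool :=
  if !(PySem.Set.inter left right).isEmpty then true
  else
    !(PySem.Set.inter left (pvLongSubs right)).isEmpty ||
      !(PySem.Set.inter right (pvLongSubs left)).isEmpty

-- ===== PRECONDITION & SPEC =====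
def Spec_template_keys_overlap_py (left : List String) (right : List String) (out : Bool) : Prop := out = template_keys_overlap_py_alt left right
instance (left : List String) (right : List String) (out : Bool) : Decidable (Spec_template_keys_overlap_py left right out) := by unfold Spec_template_keys_overlap_py; infer_instance

-- ===== CLAIM (what is proved, stated in full; the proofs are below) =====
def Claim_equal_template_keys_overlap_py : Prop := ∀ (left : List String) (right : List String), Dom_template_keys_overlap_py left right → Spec_template_keys_overlap_py left right (template_keys_overlap_py left right)

-- ===== LEMMAS AND PROOFS =====

-- a set intersection is non-empty iff the two sides share an element
lemma pv_inter_isEmpty_false_iff {α : Type} [BEq α] [LawfulBEq α] (s t : PySem.Set α) :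
    ((PySem.Set.inter s t).isEmpty = false) ↔ ∃ x ∈ s, x ∈ t := by
  rw [List.isEmpty_eq_false_iff_exists_mem]
  constructor
  · rintro ⟨x, hx⟩
    exact ⟨x, (PySem.Set.mem_inter s t x).mp hx⟩
  · rintro ⟨x, hx, hx'⟩
    exact ⟨x, (PySem.Set.mem_inter s t x).mpr ⟨hx, hx'⟩⟩

-- membership in the substring set: exactly the length-≥6 infixes of some string of the list
lemma pv_mem_pvLongSubs (strings : List String) (t : String) :
    t ∈ pvLongSubs strings ↔ ∃ s ∈ strings, 6 ≤ t.toList.length ∧ t.toList <:+: s.toList := by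
  simp only [pvLongSubs, PySem.Set.mem_ofList, List.mem_flatMap, List.mem_map,
    PySem.List.mem_pyRange_one]
  constructor
  · rintro ⟨s, hs, i, ⟨hi0, hilen⟩, j, ⟨hij, hjlen⟩, rfl⟩
    refine ⟨s, hs, ?_, ?_⟩ <;>
      rw [show (PySem.Str.slice s (some i) (some j)).toList
            = (s.toList.drop i.toNat).take (j.toNat - i.toNat) by
          rw [PySem.Str.toList_slice, PySem.Chars.slice_eq_listSlice,
            PySem.List.slice_toNat _ _ _] <;> omega]
    · have hlen : PySem.Str.len s = (s.toList.length : Int) := by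
        simp [PySem.Str.len_eq]
      rw [List.length_take, List.length_drop]
      omega
    · exact ((List.take_prefix _ _).isInfix).trans ((List.drop_suffix _ _).isInfix)
  · rintro ⟨s, hs, h6, pre, suf, hsplit⟩
    have hlen : PySem.Str.len s = (s.toList.length : Int) := by
      simp [PySem.Str.len_eq]
    have hslen : s.toList.length = pre.length + t.toList.length + suf.length := by
      rw [← hsplit]; simp; omega
    refine ⟨s, hs, (pre.length : Int), ⟨by positivity, by omega⟩,
      (pre.length : Int) + (t.toList.length : Int), ⟨by omega, by omega⟩, ?_⟩
    rw [← String.toList_inj, PySem.Str.toList_slice, PySem.Chars.slice_eq_listSlice]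
    rw [show ((pre.length : Int) + (t.toList.length : Int))
          = ((pre.length + t.toList.length : Nat) : Int) by push_cast; ring]
    rw [PySem.List.slice_natCast]
    have : s.toList.drop pre.length = t.toList ++ suf := by
      rw [← hsplit, List.append_assoc, List.drop_left]
    rw [this]
    simp

-- ===== VERDICT (by name: the statement is the Claim_ definition above) =====
theorem template_keys_overlap_py_spec : Claim_equal_template_keys_overlap_py := by
  intro left right _
  unfold Spec_template_keys_overlap_py template_keys_overlap_py template_keys_overlap_py_alt
  apply Bool.eq_iff_iff.mpr
  have hB : (if !(PySem.Set.inter left right).isEmpty then true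
      else !(PySem.Set.inter left (pvLongSubs right)).isEmpty ||
        !(PySem.Set.inter right (pvLongSubs left)).isEmpty) = true
      ↔ ((∃ x ∈ left, x ∈ right)
        ∨ (∃ a ∈ left, a ∈ pvLongSubs right)
        ∨ (∃ b ∈ right, b ∈ pvLongSubs left)) := by
    by_cases h : (PySem.Set.inter left right).isEmpty = false
    · simp only [h, Bool.not_false, if_true, true_iff]
      exact Or.inl ((pv_inter_isEmpty_false_iff left right).mp h)
    · have h' : (PySem.Set.inter left right).isEmpty = true := by
        cases hh : (PySem.Set.inter left right).isEmpty
        · exact absurd hh h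
        · rfl
      simp only [h', Bool.not_true, Bool.false_eq_true, if_false, Bool.or_eq_true,
        Bool.not_eq_true']
      rw [pv_inter_isEmpty_false_iff, pv_inter_isEmpty_false_iff]
      constructor
      · rintro (h1 | h2)
        · exact Or.inr (Or.inl h1)
        · exact Or.inr (Or.inr h2)
      · rintro (h0 | h1 | h2)
        · exact absurd ((pv_inter_isEmpty_false_iff left right).mpr h0) (by simp [h'])
        · exact Or.inl h1
        · exact Or.inr h2
  rw [hB]
  rcases left with _ | ⟨x, xs⟩
  · simp [pv_mem_pvLongSubs]
  rcases right with _ | ⟨y, ys⟩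
  · simp [pv_mem_pvLongSubs]
  rw [if_neg (by simp)]
  simp only [List.any_eq_true, Bool.or_eq_true, Bool.and_eq_true, beq_iff_eq,
    decide_eq_true_eq, PySem.Str.isIn_iff_infix, pv_mem_pvLongSubs]
  constructor
  · rintro ⟨a, ha, b, hb, h | ⟨hm, hs | hs⟩⟩
    · exact Or.inl ⟨a, ha, h ▸ hb⟩
    · refine Or.inr (Or.inl ⟨a, ha, b, hb, ?_, hs⟩)
      have la : PySem.Str.len a = (a.toList.length : Int) := by simp [PySem.Str.len_eq]
      have lb : PySem.Str.len b = (b.toList.length : Int) := by simp [PySem.Str.len_eq]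
      omega
    · refine Or.inr (Or.inr ⟨b, hb, a, ha, ?_, hs⟩)
      have la : PySem.Str.len a = (a.toList.length : Int) := by simp [PySem.Str.len_eq]
      have lb : PySem.Str.len b = (b.toList.length : Int) := by simp [PySem.Str.len_eq]
      omega
  · have la : ∀ u : String, PySem.Str.len u = (u.toList.length : Int) := by
      intro u; simp [PySem.Str.len_eq]
    rintro (⟨a, ha, hb⟩ | ⟨a, ha, b, hb, h6, hs⟩ | ⟨b, hb, a, ha, h6, hs⟩)
    · exact ⟨a, ha, a, hb, Or.inl rfl⟩
    · refine ⟨a, ha, b, hb, Or.inr ⟨?_, Or.inl hs⟩⟩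
      have := hs.length_le
      rw [la a, la b]; omega
    · refine ⟨a, ha, b, hb, Or.inr ⟨?_, Or.inr hs⟩⟩
      have := hs.length_le
      rw [la a, la b]; omega
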